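-- pv_equiv track=rewrite | github.com/JBEI/edd | edd_utils/gc_ms_workbench.py | _get_sample_index
-- ===== SOURCE A (Python) =====
-- def _get_sample_index(annotation_headers):
--     i_sample = None
--     for i_field, field in enumerate(annotation_headers):
--         if (field is None):
--             continue
--         field = field.lower()
--         if "sample" in field and "id" in field:
--             if i_sample is None:
--                 i_sample = i_field
--             else:
--                 raise RuntimeError(
--                     "Could not unambiguously determined the sample ID field in the metadata file."
--                 )
--     if i_sample is None:
--         raise RuntimeError(
--             "Could not unambiguously determined the sample ID field in the metadata file."
--         )
--     return i_sample
-- ===== SOURCE B (Python) =====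
-- def _get_sample_index(annotation_headers):
--     def ok(f):
--         return f is not None and "sample" in f.lower() and "id" in f.lower()
--
--     pairs = list(enumerate(annotation_headers))
--     first = next((i for i, f in pairs if ok(f)), None)
--     last = next((i for i, f in reversed(pairs) if ok(f)), None)
--     if first is None or first != last:
--         raise RuntimeError(
--             "Could not unambiguously determined the sample ID field in the metadata file."
--         )
--     return first
-- ===== Notes on version B (the rewrite author's own statement) =====
-- stated objective: alternative
-- what changed: Replaces A's stateful single pass (Optional accumulator with an inline ambiguity guard) by a first-from-the-front vs first-from-the-back search: the match is unique iff both searches exist and return the same index.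
import Mathlib
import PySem

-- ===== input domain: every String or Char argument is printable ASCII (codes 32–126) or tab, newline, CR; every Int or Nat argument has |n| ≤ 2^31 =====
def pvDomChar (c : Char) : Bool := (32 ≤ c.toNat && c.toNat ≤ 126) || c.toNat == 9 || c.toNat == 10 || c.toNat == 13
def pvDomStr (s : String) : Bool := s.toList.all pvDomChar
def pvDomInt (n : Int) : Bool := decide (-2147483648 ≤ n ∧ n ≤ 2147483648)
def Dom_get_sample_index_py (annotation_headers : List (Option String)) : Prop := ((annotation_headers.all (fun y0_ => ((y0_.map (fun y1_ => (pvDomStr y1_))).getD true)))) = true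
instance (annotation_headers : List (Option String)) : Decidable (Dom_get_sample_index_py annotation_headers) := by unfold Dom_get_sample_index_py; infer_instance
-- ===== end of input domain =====

-- B replaces A's stateful early-exit loop by two searches (first match from the front, first from the
-- back) that must coincide (objective: alternative); Pre_ excludes the inputs on which A raises
-- RuntimeError (no match, or more than one match).


-- shared header test: f is not None and "sample" in f.lower() and "id" in f.lower()
def sampleIdMatch (f : Option String) : Bool :=
  match f with
  | none => false
  | some s =>
      let fl := PySem.Str.lower s
      PySem.Str.isIn "sample" fl && PySem.Str.isIn "id" fl

-- ===== PORT A =====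
-- the for-loop of A: state i_sample : Option Int; outer `none` = RuntimeError raised
def getSampleLoopA : List (Option String) → Int → Option Int → Option (Option Int)
  | [], _, st => some st
  | field :: rest, i_field, st =>
      if sampleIdMatch field then
        match st with
        | none => getSampleLoopA rest (i_field + 1) (some i_field)
        | some _ => none          -- raise RuntimeError (ambiguous)
      else getSampleLoopA rest (i_field + 1) st

def get_sample_index_py (annotation_headers : List (Option String)) : Int :=
  match getSampleLoopA annotation_headers 0 none with
  | some (some i) => i
  | _ => 0                        -- RuntimeError; excluded by Pre_

-- ===== PORT B =====
def get_sample_index_py_alt (annotation_headers : List (Option String)) : Int :=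
  let pairs := PySem.List.enumerate annotation_headers 0
  let first := (pairs.find? (fun p => sampleIdMatch p.2)).map (fun p => p.1)
  let last := (pairs.reverse.find? (fun p => sampleIdMatch p.2)).map (fun p => p.1)
  match first with
  | none => 0                     -- RuntimeError; excluded by Pre_
  | some a => if last = some a then a else 0   -- else-branch: RuntimeError; excluded by Pre_

-- ===== PRECONDITION & SPEC =====
-- Pre_: exactly one header matches (A raises RuntimeError otherwise)
def Pre_get_sample_index_py (annotation_headers : List (Option String)) : Prop :=
  annotation_headers.countP sampleIdMatch = 1
instance (annotation_headers : List (Option String)) : Decidable (Pre_get_sample_index_py annotation_headers) := by unfold Pre_get_sample_index_py; infer_instance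
def pvWitness_get_sample_index_py : List (Option String) := [some "col", none, some "Sample ID"]

def Spec_get_sample_index_py (annotation_headers : List (Option String)) (out : Int) : Prop := out = get_sample_index_py_alt annotation_headers
instance (annotation_headers : List (Option String)) (out : Int) : Decidable (Spec_get_sample_index_py annotation_headers out) := by unfold Spec_get_sample_index_py; infer_instance

-- ===== CLAIM (what is proved, stated in full; the proofs are below) =====
def Claim_equal_get_sample_index_py : Prop := ∀ (annotation_headers : List (Option String)), Dom_get_sample_index_py annotation_headers → Pre_get_sample_index_py annotation_headers → Spec_get_sample_index_py annotation_headers (get_sample_index_py annotation_headers)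

-- ===== LEMMAS AND PROOFS =====

-- the enumerated pairs that match, starting at offset i
def matchPairs (hs : List (Option String)) (i : Int) : List (Int × Option String) :=
  (PySem.List.enumerate hs i).filter (fun p => sampleIdMatch p.2)

theorem matchPairs_cons (f : Option String) (hs : List (Option String)) (i : Int) :
    matchPairs (f :: hs) i =
      (if sampleIdMatch f then [(i, f)] else []) ++ matchPairs hs (i + 1) := by
  simp [matchPairs, PySem.List.enumerate_cons]
  split_ifs <;> simp_all

-- characterisation of A's loop by the matching-pair list
theorem getSampleLoopA_eq (hs : List (Option String)) (i : Int) :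
    (getSampleLoopA hs i none =
      match matchPairs hs i with
      | [] => some none
      | [p] => some (some p.1)
      | _ => none) ∧
    ∀ s : Int, getSampleLoopA hs i (some s) =
      match matchPairs hs i with
      | [] => some (some s)
      | _ => none := by
  induction hs generalizing i with
  | nil => simp [getSampleLoopA, matchPairs, PySem.List.enumerate_nil]
  | cons f rest ih =>
    rw [show matchPairs (f :: rest) i = _ from matchPairs_cons f rest i]
    constructor
    · by_cases h : sampleIdMatch f = true
      · simp only [getSampleLoopA, h, if_pos]
        rw [(ih (i + 1)).2 i]
        cases hm : matchPairs rest (i + 1) <;> simp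
      · simp only [getSampleLoopA, h, if_neg, Bool.false_eq_true, not_false_iff]
        rw [(ih (i + 1)).1]
        simp
    · intro s
      by_cases h : sampleIdMatch f = true
      · simp only [getSampleLoopA, h, if_pos]
        simp
      · simp only [getSampleLoopA, h, if_neg, Bool.false_eq_true, not_false_iff]
        rw [(ih (i + 1)).2 s]
        simp

theorem length_matchPairs (hs : List (Option String)) (i : Int) :
    (matchPairs hs i).length = hs.countP sampleIdMatch := by
  induction hs generalizing i with
  | nil => simp [matchPairs, PySem.List.enumerate_nil]
  | cons f rest ih =>
    rw [matchPairs_cons]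
    by_cases h : sampleIdMatch f = true <;> simp [h, ih (i + 1)]

-- ===== VERDICT (by name: the statement is the Claim_ definition above) =====
theorem get_sample_index_py_spec : Claim_equal_get_sample_index_py := by
  intro hs _ hpre
  unfold Spec_get_sample_index_py get_sample_index_py get_sample_index_py_alt
  have hlen : (matchPairs hs 0).length = 1 := by
    rw [length_matchPairs]; exact hpre
  obtain ⟨p, hp⟩ : ∃ p, matchPairs hs 0 = [p] := by
    cases h : matchPairs hs 0 with
    | nil => simp [h] at hlen
    | cons a t =>
      cases t with
      | nil => exact ⟨a, rfl⟩
      | cons b t' => simp [h] at hlen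
  have hfind : (PySem.List.enumerate hs 0).find? (fun p => sampleIdMatch p.2) = some p := by
    rw [← List.head?_filter]
    simp [matchPairs] at hp
    simp [hp]
  have hfindr : (PySem.List.enumerate hs 0).reverse.find? (fun p => sampleIdMatch p.2) = some p := by
    rw [← List.head?_filter, List.filter_reverse]
    simp [matchPairs] at hp
    simp [hp]
  rw [(getSampleLoopA_eq hs 0).1, hp]
  simp [hfind, hfindr]
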